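-- pv_equiv track=rewrite | github.com/Secuter/ColorConversion | tools/pdf-import/src/1_parse_sources.py | normalize_table_rows
-- ===== SOURCE A (Python) =====
-- def normalize_table_rows(rows: list[list[str]]) -> list[list[str]]:
--     cleaned_rows: list[list[str]] = []
--     for row in rows:
--         cleaned = [str(cell or "").replace("\n", " ").strip() for cell in row]
--         if any(cleaned):
--             cleaned_rows.append(cleaned)
--
--     if not cleaned_rows:
--         return []
--
--     width = max(len(row) for row in cleaned_rows)
--     return [row + [""] * (width - len(row)) for row in cleaned_rows]
-- ===== SOURCE B (Python) =====
-- def normalize_table_rows(rows: list[list[str]]) -> list[list[str]]: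
--     cleaned_rows: list[list[str]] = []
--     for row in rows:
--         cleaned = [str(cell or "").replace("\n", " ").strip() for cell in row]
--         if any(cleaned):
--             cleaned_rows.append(cleaned)
--
--     # column-wise padding: emit column j of every kept row (missing cells as "")
--     # until no row has a j-th cell; no max-width pass, no early return needed.
--     out: list[list[str]] = [[] for _ in cleaned_rows]
--     j = 0
--     while any(j < len(r) for r in cleaned_rows):
--         for o, r in zip(out, cleaned_rows):
--             o.append(r[j] if j < len(r) else "")
--         j += 1
--     return out
-- ===== Notes on version B (the rewrite author's own statement) =====
-- stated objective: alternative
-- what changed: Padding is done column-wise: instead of computing the max width and appending per-row filler, B repeatedly emits cell j of every kept row (missing cells as "") until no row has a j-th cell, building the padded table column by column with no max() pass and no early return.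
import Mathlib
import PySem

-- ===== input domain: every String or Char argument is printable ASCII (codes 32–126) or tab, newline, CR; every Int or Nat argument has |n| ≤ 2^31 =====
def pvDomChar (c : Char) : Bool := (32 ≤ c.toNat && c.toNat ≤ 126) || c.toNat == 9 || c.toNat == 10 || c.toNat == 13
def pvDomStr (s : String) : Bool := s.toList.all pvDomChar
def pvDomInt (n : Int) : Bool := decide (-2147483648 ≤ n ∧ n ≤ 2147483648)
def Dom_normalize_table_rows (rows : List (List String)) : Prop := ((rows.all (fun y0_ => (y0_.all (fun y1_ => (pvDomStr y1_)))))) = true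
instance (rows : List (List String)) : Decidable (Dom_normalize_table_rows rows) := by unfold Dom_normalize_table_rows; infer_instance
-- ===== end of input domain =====

-- B pads column-wise (emit cell j of every kept row until no row has one) instead of A's
-- max-width pass + per-row filler; alternative decomposition, same asymptotic cost.

-- str(cell or "").replace("\n", " ").strip()
def pvCleanCell (cell : String) : String :=
  PySem.Str.strip (PySem.Str.replace (if cell == "" then "" else cell) "\n" " ")

-- ===== PORT A =====
def normalize_table_rows (rows : List (List String)) : List (List String) :=
  let cleaned_rows : List (List String) :=
    rows.foldl (fun acc row =>
      let cleaned := row.map pvCleanCell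
      if cleaned.any (fun c => c ≠ "") then acc ++ [cleaned] else acc) []
  if cleaned_rows = [] then []
  else
    let width := ((cleaned_rows.map List.length).max?).getD 0
    cleaned_rows.map (fun row => row ++ List.replicate (width - row.length) "")

-- ===== PORT B =====
-- row lengths are bounded by the running foldl max (needed for the while loop's termination)
theorem pv_foldl_max_mono (l : List (List String)) (n : Nat) :
    n ≤ l.foldl (fun m r => max m r.length) n := by
  induction l generalizing n with
  | nil => simp
  | cons x xs ih => exact le_trans (le_max_left _ _) (ih (max n x.length))

theorem pv_len_le_foldl (l : List (List String)) (n : Nat) :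
    ∀ r ∈ l, r.length ≤ l.foldl (fun m r => max m r.length) n := by
  induction l generalizing n with
  | nil => simp
  | cons x xs ih =>
    intro r hr
    rcases List.mem_cons.mp hr with hr | hr
    · subst hr
      exact le_trans (le_max_right n r.length) (pv_foldl_max_mono xs _)
    · exact ih _ r hr

-- the while loop: while any(j < len(r) for r in cleaned): append column j to each output row
def pvPadLoop (cleaned : List (List String)) (out : List (List String)) (j : Nat) :
    List (List String) :=
  if h : cleaned.any (fun r => j < r.length) then
    pvPadLoop cleaned
      ((out.zip cleaned).map (fun p => p.1 ++ [if j < p.2.length then p.2.getD j "" else ""]))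
      (j + 1)
  else out
termination_by cleaned.foldl (fun m r => max m r.length) 0 - j
decreasing_by
  simp only [List.any_eq_true, decide_eq_true_eq] at h
  obtain ⟨r, hr, hj⟩ := h
  have := pv_len_le_foldl cleaned 0 r hr
  omega

def normalize_table_rows_alt (rows : List (List String)) : List (List String) :=
  let cleaned_rows : List (List String) :=
    rows.foldl (fun acc row =>
      let cleaned := row.map pvCleanCell
      if cleaned.any (fun c => c ≠ "") then acc ++ [cleaned] else acc) []
  pvPadLoop cleaned_rows (cleaned_rows.map (fun _ => [])) 0

-- ===== PRECONDITION & SPEC =====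
def Spec_normalize_table_rows (rows : List (List String)) (out : List (List String)) : Prop := out = normalize_table_rows_alt rows
instance (rows : List (List String)) (out : List (List String)) : Decidable (Spec_normalize_table_rows rows out) := by unfold Spec_normalize_table_rows; infer_instance

-- ===== CLAIM =====
def Claim_equal_normalize_table_rows : Prop := ∀ (rows : List (List String)), Dom_normalize_table_rows rows → Spec_normalize_table_rows rows (normalize_table_rows rows)

-- ===== LEMMAS AND PROOFS =====

def pvW (cleaned : List (List String)) : Nat :=
  cleaned.foldl (fun m r => max m r.length) 0

def pvPad (cleaned : List (List String)) (r : List String) : List String :=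
  r ++ List.replicate (pvW cleaned - r.length) ""

theorem pv_zip_map_self {α β : Type} (f : α → β) (l : List α) :
    (l.map f).zip l = l.map (fun x => (f x, x)) := by
  induction l with
  | nil => rfl
  | cons x xs ih => simp [ih]

theorem pv_foldl_max_le (l : List (List String)) (n j : Nat)
    (h0 : n ≤ j) (h : ∀ r ∈ l, r.length ≤ j) :
    l.foldl (fun m r => max m r.length) n ≤ j := by
  induction l generalizing n with
  | nil => simpa using h0
  | cons x xs ih =>
    simp only [List.foldl_cons]
    exact ih _ (max_le h0 (h x (by simp))) (fun r hr => h r (List.mem_cons_of_mem _ hr))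

theorem pv_pad_length (cleaned : List (List String)) (r : List String)
    (hr : r ∈ cleaned) : (pvPad cleaned r).length = pvW cleaned := by
  have := pv_len_le_foldl cleaned 0 r hr
  simp only [pvPad, List.length_append, List.length_replicate, pvW] at *
  omega

theorem pvPadLoop_inv (cleaned : List (List String)) :
    ∀ (k j : Nat), pvW cleaned ≤ j + k →
      pvPadLoop cleaned (cleaned.map (fun r => (pvPad cleaned r).take j)) j
        = cleaned.map (pvPad cleaned) := by
  intro k
  induction k with
  | zero =>
    intro j hj
    rw [pvPadLoop]
    rw [dif_neg]
    · apply List.map_congr_left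
      intro r hr
      apply List.take_of_length_le
      rw [pv_pad_length cleaned r hr]; omega
    · simp only [List.any_eq_true, decide_eq_true_eq, not_exists, not_and, not_lt]
      intro r hr
      have h1 := pv_len_le_foldl cleaned 0 r hr
      simp only [pvW] at hj
      omega
  | succ k ih =>
    intro j hj
    rw [pvPadLoop]
    by_cases hc : cleaned.any (fun r => j < r.length) = true
    · rw [dif_pos hc]
      have hjW : j < pvW cleaned := by
        simp only [List.any_eq_true, decide_eq_true_eq] at hc
        obtain ⟨r, hr⟩ := hc
        have := pv_len_le_foldl cleaned 0 r hr.1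
        have := hr.2
        simp only [pvW]; omega
      have hstep :
          ((cleaned.map (fun r => (pvPad cleaned r).take j)).zip cleaned).map
              (fun p => p.1 ++ [if j < p.2.length then p.2.getD j "" else ""])
            = cleaned.map (fun r => (pvPad cleaned r).take (j + 1)) := by
        rw [pv_zip_map_self]
        rw [List.map_map]
        apply List.map_congr_left
        intro r hr
        have hlen : j < (pvPad cleaned r).length := by
          rw [pv_pad_length cleaned r hr]; exact hjW
        simp only [Function.comp]
        rw [List.take_add_one, List.getElem?_eq_getElem hlen]
        congr 1
        simp only [Option.toList_some]
        congr 1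
        by_cases hjr : j < r.length
        · rw [if_pos hjr]
          simp only [pvPad]
          rw [List.getElem_append_left hjr]
          simp [List.getD, List.getElem?_eq_getElem hjr]
        · rw [if_neg hjr]
          simp only [pvPad]
          rw [List.getElem_append_right (by omega)]
          simp
      rw [hstep]
      exact ih (j + 1) (by omega)
    · rw [dif_neg hc]
      apply List.map_congr_left
      intro r hr
      apply List.take_of_length_le
      rw [pv_pad_length cleaned r hr]
      simp only [List.any_eq_true, decide_eq_true_eq, not_exists, not_and, not_lt] at hc
      apply pv_foldl_max_le _ _ _ (Nat.zero_le _)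
      intro s hs
      have := hc s hs
      omega

def pvCleaned (rows : List (List String)) : List (List String) :=
  (rows.map (fun row => row.map pvCleanCell)).filter (fun r => r.any (fun c => c ≠ ""))

theorem pvA_fold (rows : List (List String)) (acc : List (List String)) :
    rows.foldl (fun acc row =>
      let cleaned := row.map pvCleanCell
      if cleaned.any (fun c => c ≠ "") then acc ++ [cleaned] else acc) acc
    = acc ++ pvCleaned rows := by
  induction rows generalizing acc with
  | nil => simp [pvCleaned]
  | cons r rs ih =>
    simp only [List.foldl_cons]
    rw [ih]
    show (if (r.map pvCleanCell).any (fun c => c ≠ "") then acc ++ [r.map pvCleanCell] else acc)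
        ++ pvCleaned rs = acc ++ pvCleaned (r :: rs)
    simp only [pvCleaned, List.map_cons, List.filter_cons]
    by_cases h : ((r.map pvCleanCell).any (fun c => decide (c ≠ ""))) = true
    · rw [if_pos h, if_pos h]; simp
    · rw [if_neg h, if_neg h]

theorem pvMaxAux (l : List (List String)) (n : Nat) :
    List.foldl max n (l.map List.length) = l.foldl (fun m r => max m r.length) n := by
  induction l generalizing n with
  | nil => rfl
  | cons x xs ih => simp only [List.map_cons, List.foldl_cons, ih]

theorem pvMax_eq (a : List String) (l : List (List String)) :
    (((a :: l).map List.length).max?).getD 0 = pvW (a :: l) := by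
  simp only [List.map_cons, List.max?, Option.getD_some, pvW, List.foldl_cons, Nat.zero_max]
  exact pvMaxAux l a.length

-- ===== VERDICT =====
theorem normalize_table_rows_spec : Claim_equal_normalize_table_rows := by
  intro rows _
  show normalize_table_rows rows = normalize_table_rows_alt rows
  unfold normalize_table_rows normalize_table_rows_alt
  simp only [pvA_fold, List.nil_append]
  have hB : pvPadLoop (pvCleaned rows) ((pvCleaned rows).map (fun _ => [])) 0
      = (pvCleaned rows).map (pvPad (pvCleaned rows)) := by
    have h0 : (pvCleaned rows).map (fun _ : List String => ([] : List String))
        = (pvCleaned rows).map (fun r => (pvPad (pvCleaned rows) r).take 0) := by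
      simp
    rw [h0]
    exact pvPadLoop_inv (pvCleaned rows) (pvW (pvCleaned rows)) 0 (by omega)
  rw [hB]
  cases h : pvCleaned rows with
  | nil => simp
  | cons a l =>
    rw [if_neg (by simp)]
    rw [pvMax_eq]
    rfl
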